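-- pv_equiv track=rewrite | github.com/IGarbur/Bioinformatics.v1 | lcs_binary_and_set.py | get_shortest
-- ===== SOURCE A (Python) =====
-- def get_shortest(sequences):
--     index_of_shortest = 0
--     length_of_shortest = len(sequences[0])
--     for i in range(len(sequences)):
--         if len(sequences[i]) < length_of_shortest:
--             index_of_shortest = i
--             length_of_shortest = len(sequences[i])
--     return sequences[index_of_shortest]
-- ===== SOURCE B (Python) =====
-- def get_shortest(sequences):
--     return sorted(sequences, key=len)[0]
-- ===== Notes on version B (the rewrite author's own statement) =====
-- stated objective: idiomatic
-- what changed: Replaces the explicit index-tracking min-scan loop with a stable sort by length followed by taking the first element.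
import Mathlib
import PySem

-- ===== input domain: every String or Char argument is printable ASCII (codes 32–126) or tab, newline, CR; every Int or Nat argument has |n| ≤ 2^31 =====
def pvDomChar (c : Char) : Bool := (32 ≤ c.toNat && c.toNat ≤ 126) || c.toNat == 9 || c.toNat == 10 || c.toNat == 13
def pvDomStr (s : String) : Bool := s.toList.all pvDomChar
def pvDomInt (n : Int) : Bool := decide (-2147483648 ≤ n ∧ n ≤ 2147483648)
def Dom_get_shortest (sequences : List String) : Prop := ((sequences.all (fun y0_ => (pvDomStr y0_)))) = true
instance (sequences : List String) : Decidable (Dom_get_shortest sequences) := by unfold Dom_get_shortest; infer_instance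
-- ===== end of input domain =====

-- B replaces A's explicit index-tracking min-scan loop by a stable sort on length
-- followed by taking the first element (idiomatic; same result, not claimed faster).

-- ===== PORT A =====
def get_shortest (sequences : List String) : String :=
  -- index_of_shortest = 0; length_of_shortest = len(sequences[0])
  let init : Int × Int := (0, PySem.Str.len (PySem.List.pyGetD sequences 0 ""))
  -- for i in range(len(sequences)): if len(sequences[i]) < length_of_shortest: update both
  let st := (PySem.List.pyRange 0 (sequences.length : Int) 1).foldl
    (fun st i =>
      if PySem.Str.len (PySem.List.pyGetD sequences i "") < st.2 then
        (i, PySem.Str.len (PySem.List.pyGetD sequences i ""))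
      else st) init
  -- return sequences[index_of_shortest]
  PySem.List.pyGetD sequences st.1 ""

-- ===== PORT B =====
def get_shortest_alt (sequences : List String) : String :=
  -- return sorted(sequences, key=len)[0]
  PySem.List.pyGetD (PySem.List.sorted sequences (fun s => PySem.Str.len s)) 0 ""

-- ===== PRECONDITION & SPEC =====
-- A raises IndexError on the empty list (sequences[0]); B's sorted(...)[0] raises there too.
def Pre_get_shortest (sequences : List String) : Prop := sequences ≠ []
instance (sequences : List String) : Decidable (Pre_get_shortest sequences) := by
  unfold Pre_get_shortest; infer_instance

def pvWitness_get_shortest : List String := ["ab", "c", "def"]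

def Spec_get_shortest (sequences : List String) (out : String) : Prop := out = get_shortest_alt sequences
instance (sequences : List String) (out : String) : Decidable (Spec_get_shortest sequences out) := by unfold Spec_get_shortest; infer_instance

-- ===== CLAIM (what is proved, stated in full; the proofs are below) =====
def Claim_equal_get_shortest : Prop := ∀ (sequences : List String), Dom_get_shortest sequences → Pre_get_shortest sequences → Spec_get_shortest sequences (get_shortest sequences)

-- ===== LEMMAS AND PROOFS =====

-- the first element of minimal length in x :: xs (strict '<' keeps the earlier one on ties)
def fm (x : String) (xs : List String) : String :=
  xs.foldl (fun b y => if PySem.Str.len y < PySem.Str.len b then y else b) x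

def fmL (l : List String) : String :=
  match l with
  | [] => ""
  | x :: xs => fm x xs

lemma fmL_append (l : List String) (hl : l ≠ []) (y : String) :
    fmL (l ++ [y]) = if PySem.Str.len y < PySem.Str.len (fmL l) then y else fmL l := by
  cases l with
  | nil => exact absurd rfl hl
  | cons x xs => simp [fmL, fm, List.foldl_append]

-- head of the stable sort by length is the first element of minimal length
lemma head?_sorted_eq_fmL (l : List String) (hl : l ≠ []) :
    (PySem.List.sorted l (fun s => PySem.Str.len s)).head? = some (fmL l) := by
  induction l using List.reverseRecOn with
  | nil => exact absurd rfl hl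
  | append_singleton ys y ih =>
    rw [PySem.List.sorted_eq_foldl_insertBy, List.foldl_append]
    rcases eq_or_ne ys [] with h | h
    · subst h
      simp [PySem.List.insertBy, fmL, fm]
    · rw [← PySem.List.sorted_eq_foldl_insertBy]
      have hfm := ih h
      rcases hs : PySem.List.sorted ys (fun s => PySem.Str.len s) with _ | ⟨m, t⟩
      · rw [PySem.List.sorted_eq_nil_iff] at hs; exact absurd hs h
      · rw [hs] at hfm
        have hm : m = fmL ys := by simpa using hfm
        rw [fmL_append ys h y, ← hm]
        have hins : PySem.List.insertBy
            (fun a b => decide (PySem.Str.len a < PySem.Str.len b)) y (m :: t)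
            = if decide (PySem.Str.len y < PySem.Str.len m) = true then y :: m :: t
              else m :: PySem.List.insertBy
                (fun a b => decide (PySem.Str.len a < PySem.Str.len b)) y t := rfl
        rw [List.foldl_cons, List.foldl_nil, hins]
        by_cases hlt : y.length < m.length <;> simp [hlt]

-- invariant of A's min-scan loop over the first n indices: the state is
-- (k, len(seq[k])) where seq[k] is the first element of minimal length in seq[:n]
lemma loop_inv (seq : List String) (hne : seq ≠ []) (n : Nat) (h1 : 1 ≤ n) (hn : n ≤ seq.length) :
    ∃ k : Nat, k < n ∧
      ((PySem.List.pyRange 0 (n : Int) 1).foldl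
        (fun st i =>
          if PySem.Str.len (PySem.List.pyGetD seq i "") < st.2 then
            (i, PySem.Str.len (PySem.List.pyGetD seq i ""))
          else st) ((0 : Int), PySem.Str.len (PySem.List.pyGetD seq 0 "")))
        = ((k : Int), PySem.Str.len (seq.getD k "")) ∧
      seq.getD k "" = fmL (seq.take n) := by
  induction n with
  | zero => omega
  | succ n ih =>
    rcases Nat.lt_or_ge n 1 with hsm | hge
    · interval_cases n
      refine ⟨0, Nat.zero_lt_one, ?_, ?_⟩
      · rw [show ((1:Nat):Int) = 0 + 1 from rfl,
            PySem.List.pyRange_one_succ_right (le_refl 0),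
            PySem.List.pyRange_one_eq_nil (le_refl 0)]
        simp [PySem.List.pyGetD_zero, List.getD]
      · rcases seq with _ | ⟨a, t⟩
        · exact absurd rfl hne
        · simp [fmL, fm]
    · have hcast : ((n + 1 : Nat) : Int) = (n : Int) + 1 := by push_cast; ring
      rw [hcast, PySem.List.pyRange_one_succ_right (by positivity), List.foldl_append]
      obtain ⟨k, hk, hst, hfm⟩ := ih hge (by omega)
      rw [hst]
      have hnlt : n < seq.length := by omega
      have htake : seq.take (n + 1) = seq.take n ++ [seq.getD n ""] := by
        rw [List.take_add_one]
        congr 1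
        simp [List.getElem?_eq_getElem hnlt, List.getD]
      have htne : seq.take n ≠ [] := by
        intro hcon
        have := congrArg List.length hcon
        simp [Nat.min_eq_left (by omega : n ≤ seq.length)] at this
        omega
      simp only [List.foldl_cons, List.foldl_nil, PySem.List.pyGetD_natCast]
      rw [htake, fmL_append _ htne, ← hfm]
      by_cases hlt : (seq[n]?.getD "").length < (seq[k]?.getD "").length
      · refine ⟨n, by omega, ?_, ?_⟩ <;> simp [List.getD, hlt]
      · refine ⟨k, by omega, ?_, ?_⟩ <;> simp [List.getD, hlt]

-- ===== VERDICT (by name: the statement is the Claim_ definition above) =====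
theorem get_shortest_spec : Claim_equal_get_shortest := by
  intro seq _hdom hpre
  have hne : seq ≠ [] := hpre
  have hlen : 1 ≤ seq.length := List.length_pos_iff.mpr hne
  show get_shortest seq = get_shortest_alt seq
  obtain ⟨k, hk, hst, hfm⟩ := loop_inv seq hne seq.length hlen (le_refl _)
  rcases hs : PySem.List.sorted seq (fun s => PySem.Str.len s) with _ | ⟨m, t⟩
  · rw [PySem.List.sorted_eq_nil_iff] at hs; exact absurd hs hne
  · have hm : m = fmL seq := by
      have := head?_sorted_eq_fmL seq hne
      rw [hs] at this
      simpa using this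
    simp only [get_shortest, get_shortest_alt, hst, hs, PySem.List.pyGetD_zero_cons,
      PySem.List.pyGetD_natCast, hm]
    rw [hfm, List.take_length]
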